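-- pv_equiv track=rewrite | github.com/Andrey-Mel/ocr_text_passport | utils_prj.py | groping
-- ===== SOURCE A (Python) =====
-- def groping(coordinats):
--     (
--         lst_10,
--         lst_20,
--         lst_30,
--         # lst_40,
--         # lst_50,
--         # lst_60,
--         lst_70,
--     ) = ([], [], [], [])
--     all_data = []
--     out_data = []
--     for i in coordinats:
--         if i[2] <= 20:
--             lst_10.append(i)
--
--         elif 20 < i[2] <= 40:
--             lst_20.append(i)
--
--         elif 40 < i[2] <= 60:
--             lst_30.append(i)
--
--         # elif 30 < i[2] <= 40:
--         #     lst_40.append(i)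
--
--         # elif 40 < i[2] <= 50:
--         #     lst_50.append(i)
--
--         # elif 50 < i[2] <= 60:
--         #     lst_60.append(i)
--         else:
--             lst_70.append(i)
--
--     all_data = [
--         lst
--         for lst in (
--             lst_10,
--             lst_20,
--             lst_30,
--             # lst_40,
--             # lst_50,
--             # lst_60,
--             lst_70,
--         )
--         if lst
--     ]
--     for i in range(len(all_data)):
--         group_sort = sorted(all_data[i], key=lambda point: (point[0]))
--         out_data.extend(group_sort)
--         # out_data.extend(all_data[i])
--     return out_data
-- ===== SOURCE B (Python) =====
-- def _bucket(p):
--     y = p[2]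
--     if y <= 20:
--         return 0
--     elif y <= 40:
--         return 1
--     elif y <= 60:
--         return 2
--     else:
--         return 3
--
--
-- def groping(coordinats):
--     return sorted(coordinats, key=lambda p: (_bucket(p), p[0]))
-- ===== Notes on version B (the rewrite author's own statement) =====
-- stated objective: simpler
-- what changed: Replaced A's four maintained bucket lists, the non-empty filtering pass and the per-bucket sorts concatenated in a loop by a single stable sort of the whole list on the composite key (bucket(p), p[0]), where bucket replicates A's y-range thresholds.
import Mathlib
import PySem

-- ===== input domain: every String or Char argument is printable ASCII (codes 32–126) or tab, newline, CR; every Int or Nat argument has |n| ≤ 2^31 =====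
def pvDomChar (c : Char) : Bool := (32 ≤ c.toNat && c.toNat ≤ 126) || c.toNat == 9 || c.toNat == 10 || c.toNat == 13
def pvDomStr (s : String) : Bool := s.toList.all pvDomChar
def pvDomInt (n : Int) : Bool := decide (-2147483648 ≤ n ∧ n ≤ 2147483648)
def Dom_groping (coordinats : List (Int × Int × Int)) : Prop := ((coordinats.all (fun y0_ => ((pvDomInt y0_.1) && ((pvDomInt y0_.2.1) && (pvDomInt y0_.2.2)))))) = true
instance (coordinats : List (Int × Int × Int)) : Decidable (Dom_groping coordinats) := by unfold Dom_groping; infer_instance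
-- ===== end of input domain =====

-- B replaces A's four bucket lists and per-bucket sorts by one stable sort on the composite key (bucket, x): simpler.

-- ===== PORT A =====
-- the partition loop: state (lst_10, lst_20, lst_30, lst_70)
def gropingStep (s : List (Int × Int × Int) × List (Int × Int × Int) × List (Int × Int × Int) × List (Int × Int × Int))
    (i : Int × Int × Int) :
    List (Int × Int × Int) × List (Int × Int × Int) × List (Int × Int × Int) × List (Int × Int × Int) :=
  if i.2.2 ≤ 20 then (s.1 ++ [i], s.2.1, s.2.2.1, s.2.2.2)
  else if 20 < i.2.2 ∧ i.2.2 ≤ 40 then (s.1, s.2.1 ++ [i], s.2.2.1, s.2.2.2)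
  else if 40 < i.2.2 ∧ i.2.2 ≤ 60 then (s.1, s.2.1, s.2.2.1 ++ [i], s.2.2.2)
  else (s.1, s.2.1, s.2.2.1, s.2.2.2 ++ [i])

def groping (coordinats : List (Int × Int × Int)) : List (Int × Int × Int) :=
  let st := coordinats.foldl gropingStep ([], [], [], [])
  let all_data := [st.1, st.2.1, st.2.2.1, st.2.2.2].filter (fun lst => !lst.isEmpty)
  (PySem.List.pyRange 0 (all_data.length) 1).foldl
    (fun out_data i =>
      out_data ++ PySem.List.sorted (PySem.List.pyGetD all_data i []) (fun point => point.1) false) []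

-- ===== PORT B =====
def gropingBucket (p : Int × Int × Int) : Int :=
  if p.2.2 ≤ 20 then 0
  else if p.2.2 ≤ 40 then 1
  else if p.2.2 ≤ 60 then 2
  else 3

def groping_alt (coordinats : List (Int × Int × Int)) : List (Int × Int × Int) :=
  PySem.List.sorted2 coordinats (fun p => gropingBucket p) (fun p => p.1) false

-- ===== PRECONDITION & SPEC =====
def Spec_groping (coordinats : List (Int × Int × Int)) (out : List (Int × Int × Int)) : Prop := out = groping_alt coordinats
instance (coordinats : List (Int × Int × Int)) (out : List (Int × Int × Int)) : Decidable (Spec_groping coordinats out) := by unfold Spec_groping; infer_instance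

-- ===== CLAIM (what is proved, stated in full; the proofs are below) =====
def Claim_equal_groping : Prop := ∀ (coordinats : List (Int × Int × Int)), Dom_groping coordinats → Spec_groping coordinats (groping coordinats)

-- ===== LEMMAS AND PROOFS =====

-- the before-test sorted2 uses on our composite key
def gropingLex (u v : Int × Int × Int) : Bool :=
  decide (gropingBucket u < gropingBucket v)
    || (!decide (gropingBucket v < gropingBucket u) && decide (u.1 < v.1))

-- the i-th bucket of xs, sorted by x (the building block both sides reduce to)
def gropingSb (xs : List (Int × Int × Int)) (i : Int) : List (Int × Int × Int) :=
  PySem.List.sorted (xs.filter (fun p => gropingBucket p == i)) (fun p => p.1) false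

-- insertBy passes over a prefix it does not go before
theorem insertBy_append_left {α : Type} (before : α → α → Bool) (a : α) (l r : List α)
    (h : ∀ y ∈ l, before a y = false) :
    PySem.List.insertBy before a (l ++ r) = l ++ PySem.List.insertBy before a r := by
  induction l with
  | nil => rfl
  | cons z t ih =>
    simp only [List.cons_append, PySem.List.insertBy, h z (by simp)]
    simp [ih (fun y hy => h y (by simp [hy]))]

-- insertBy stops before a suffix it goes before everywhere
theorem insertBy_append_right {α : Type} (before : α → α → Bool) (a : α) (l r : List α)
    (h : ∀ y ∈ r, before a y = true) :
    PySem.List.insertBy before a (l ++ r) = PySem.List.insertBy before a l ++ r := by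
  induction l with
  | nil =>
    cases r with
    | nil => rfl
    | cons y ys => simp [PySem.List.insertBy, h y (by simp)]
  | cons z t ih =>
    simp only [List.cons_append, PySem.List.insertBy]
    cases hz : before a z <;> simp [ih]

-- insertBy only looks at 'before a ·' on members
theorem insertBy_congr {α : Type} (p q : α → α → Bool) (a : α) (l : List α)
    (h : ∀ y ∈ l, p a y = q a y) :
    PySem.List.insertBy p a l = PySem.List.insertBy q a l := by
  induction l with
  | nil => rfl
  | cons z t ih =>
    simp only [PySem.List.insertBy, h z (by simp)]
    cases hz : q a z <;> simp [ih (fun y hy => h y (by simp [hy]))]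

theorem sorted_append_singleton (xs : List (Int × Int × Int)) (a : Int × Int × Int) :
    PySem.List.sorted (xs ++ [a]) (fun p => p.1) false
      = PySem.List.insertBy (fun u v => decide (u.1 < v.1)) a
          (PySem.List.sorted xs (fun p => p.1) false) := by
  rw [PySem.List.sorted_eq_foldl_insertBy, PySem.List.sorted_eq_foldl_insertBy, List.foldl_append]
  rfl

theorem groping_alt_append_singleton (xs : List (Int × Int × Int)) (a : Int × Int × Int) :
    groping_alt (xs ++ [a]) = PySem.List.insertBy gropingLex a (groping_alt xs) := by
  simp only [groping_alt, PySem.List.sorted2, List.foldl_append, List.foldl_cons, List.foldl_nil]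
  rfl

theorem mem_gropingSb {xs : List (Int × Int × Int)} {i : Int} {y : Int × Int × Int}
    (h : y ∈ gropingSb xs i) : gropingBucket y = i := by
  unfold gropingSb at h
  rw [PySem.List.mem_sorted] at h
  simpa using (List.mem_filter.mp h).2

theorem gropingSb_append_eq {xs : List (Int × Int × Int)} {a : Int × Int × Int} {i : Int}
    (h : gropingBucket a ≠ i) : gropingSb (xs ++ [a]) i = gropingSb xs i := by
  unfold gropingSb
  rw [List.filter_append]
  simp [h]

theorem gropingSb_append_self {xs : List (Int × Int × Int)} {a : Int × Int × Int} :
    gropingSb (xs ++ [a]) (gropingBucket a)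
      = PySem.List.insertBy (fun u v => decide (u.1 < v.1)) a (gropingSb xs (gropingBucket a)) := by
  unfold gropingSb
  rw [List.filter_append]
  simp only [List.filter_cons, List.filter_nil, beq_self_eq_true]
  exact sorted_append_singleton _ a

theorem gropingBucket_cases (p : Int × Int × Int) :
    gropingBucket p = 0 ∨ gropingBucket p = 1 ∨ gropingBucket p = 2 ∨ gropingBucket p = 3 := by
  unfold gropingBucket; split_ifs <;> simp

-- MAIN: the stable composite-key sort is the concatenation of the per-bucket sorts
theorem groping_alt_eq_buckets (xs : List (Int × Int × Int)) :
    groping_alt xs = gropingSb xs 0 ++ gropingSb xs 1 ++ gropingSb xs 2 ++ gropingSb xs 3 := by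
  induction xs using List.reverseRecOn with
  | nil => rfl
  | append_singleton xs a ih =>
    rw [groping_alt_append_singleton, ih]
    have hLexLt : ∀ y, gropingBucket a < gropingBucket y → gropingLex a y = true := by
      intro y hy; simp [gropingLex, hy]
    have hLexGt : ∀ y, gropingBucket y < gropingBucket a → gropingLex a y = false := by
      intro y hy
      simp only [gropingLex, decide_eq_true hy, Bool.not_true, Bool.false_and, Bool.or_false,
        decide_eq_false (by omega : ¬ gropingBucket a < gropingBucket y)]
    have hLexEq : ∀ y, gropingBucket y = gropingBucket a → gropingLex a y = decide (a.1 < y.1) := by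
      intro y hy; simp [gropingLex, hy]
    rcases gropingBucket_cases a with hb | hb | hb | hb
    · -- bucket 0: insert into the first block
      rw [List.append_assoc, List.append_assoc,
        insertBy_append_right gropingLex a (gropingSb xs 0) _
          (by intro y hy
              simp only [List.mem_append] at hy
              rcases hy with hy | hy | hy
              · exact hLexLt y (by rw [mem_gropingSb hy, hb]; decide)
              · exact hLexLt y (by rw [mem_gropingSb hy, hb]; decide)
              · exact hLexLt y (by rw [mem_gropingSb hy, hb]; decide)),
        insertBy_congr gropingLex (fun u v => decide (u.1 < v.1)) a _
          (by intro y hy; exact hLexEq y (by rw [mem_gropingSb hy, hb]))]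
      rw [gropingSb_append_eq (i := 1) (by rw [hb]; decide), gropingSb_append_eq (i := 2) (by rw [hb]; decide), gropingSb_append_eq (i := 3) (by rw [hb]; decide)]
      have := gropingSb_append_self (a := a) (xs := xs)
      rw [hb] at this
      rw [this]
      simp [List.append_assoc]
    · -- bucket 1
      rw [List.append_assoc, List.append_assoc,
        insertBy_append_left gropingLex a (gropingSb xs 0) _
          (by intro y hy; exact hLexGt y (by rw [mem_gropingSb hy, hb]; decide)),
        List.append_assoc,
        insertBy_append_right gropingLex a (gropingSb xs 1) _
          (by intro y hy
              simp only [List.mem_append] at hy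
              rcases hy with hy | hy
              · exact hLexLt y (by rw [mem_gropingSb hy, hb]; decide)
              · exact hLexLt y (by rw [mem_gropingSb hy, hb]; decide)),
        insertBy_congr gropingLex (fun u v => decide (u.1 < v.1)) a _
          (by intro y hy; exact hLexEq y (by rw [mem_gropingSb hy, hb]))]
      rw [gropingSb_append_eq (i := 0) (by rw [hb]; decide), gropingSb_append_eq (i := 2) (by rw [hb]; decide), gropingSb_append_eq (i := 3) (by rw [hb]; decide)]
      have := gropingSb_append_self (a := a) (xs := xs)
      rw [hb] at this
      rw [this]
      simp [List.append_assoc]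
    · -- bucket 2
      rw [List.append_assoc, List.append_assoc,
        insertBy_append_left gropingLex a (gropingSb xs 0) _
          (by intro y hy; exact hLexGt y (by rw [mem_gropingSb hy, hb]; decide)),
        insertBy_append_left gropingLex a (gropingSb xs 1) _
          (by intro y hy; exact hLexGt y (by rw [mem_gropingSb hy, hb]; decide)),
        insertBy_append_right gropingLex a (gropingSb xs 2) _
          (by intro y hy; exact hLexLt y (by rw [mem_gropingSb hy, hb]; decide)),
        insertBy_congr gropingLex (fun u v => decide (u.1 < v.1)) a _
          (by intro y hy; exact hLexEq y (by rw [mem_gropingSb hy, hb]))]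
      rw [gropingSb_append_eq (i := 0) (by rw [hb]; decide), gropingSb_append_eq (i := 1) (by rw [hb]; decide), gropingSb_append_eq (i := 3) (by rw [hb]; decide)]
      have := gropingSb_append_self (a := a) (xs := xs)
      rw [hb] at this
      rw [this]
      simp [List.append_assoc]
    · -- bucket 3: goes at the very end
      rw [List.append_assoc, List.append_assoc,
        insertBy_append_left gropingLex a (gropingSb xs 0) _
          (by intro y hy; exact hLexGt y (by rw [mem_gropingSb hy, hb]; decide)),
        insertBy_append_left gropingLex a (gropingSb xs 1) _
          (by intro y hy; exact hLexGt y (by rw [mem_gropingSb hy, hb]; decide)),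
        insertBy_append_left gropingLex a (gropingSb xs 2) _
          (by intro y hy; exact hLexGt y (by rw [mem_gropingSb hy, hb]; decide)),
        insertBy_congr gropingLex (fun u v => decide (u.1 < v.1)) a _
          (by intro y hy; exact hLexEq y (by rw [mem_gropingSb hy, hb]))]
      rw [gropingSb_append_eq (i := 0) (by rw [hb]; decide), gropingSb_append_eq (i := 1) (by rw [hb]; decide), gropingSb_append_eq (i := 2) (by rw [hb]; decide)]
      have := gropingSb_append_self (a := a) (xs := xs)
      rw [hb] at this
      rw [this]
      simp [List.append_assoc]

-- partition loop computes the four bucket filters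
theorem gropingStep_foldl (xs : List (Int × Int × Int))
    (a b c d : List (Int × Int × Int)) :
    xs.foldl gropingStep (a, b, c, d)
      = (a ++ xs.filter (fun p => gropingBucket p == 0),
         b ++ xs.filter (fun p => gropingBucket p == 1),
         c ++ xs.filter (fun p => gropingBucket p == 2),
         d ++ xs.filter (fun p => gropingBucket p == 3)) := by
  induction xs generalizing a b c d with
  | nil => simp
  | cons p t ih =>
    simp only [List.foldl_cons]
    by_cases h1 : p.2.2 ≤ 20
    · rw [show gropingStep (a, b, c, d) p = (a ++ [p], b, c, d) by
        simp [gropingStep, h1], ih]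
      have hb : gropingBucket p = 0 := by simp [gropingBucket, h1]
      simp [hb, List.append_assoc]
    · by_cases h2 : p.2.2 ≤ 40
      · rw [show gropingStep (a, b, c, d) p = (a, b ++ [p], c, d) by
          simp only [gropingStep, if_neg h1,
            if_pos (⟨by omega, h2⟩ : 20 < p.2.2 ∧ p.2.2 ≤ 40)], ih]
        have hb : gropingBucket p = 1 := by simp [gropingBucket, h1, h2]
        simp [hb, List.append_assoc]
      · by_cases h3 : p.2.2 ≤ 60
        · rw [show gropingStep (a, b, c, d) p = (a, b, c ++ [p], d) by
            simp only [gropingStep, if_neg h1,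
              if_neg (by omega : ¬ (20 < p.2.2 ∧ p.2.2 ≤ 40)),
              if_pos (⟨by omega, h3⟩ : 40 < p.2.2 ∧ p.2.2 ≤ 60)], ih]
          have hb : gropingBucket p = 2 := by simp [gropingBucket, h1, h2, h3]
          simp [hb, List.append_assoc]
        · rw [show gropingStep (a, b, c, d) p = (a, b, c, d ++ [p]) by
            simp only [gropingStep, if_neg h1,
              if_neg (by omega : ¬ (20 < p.2.2 ∧ p.2.2 ≤ 40)),
              if_neg (by omega : ¬ (40 < p.2.2 ∧ p.2.2 ≤ 60))], ih]
          have hb : gropingBucket p = 3 := by simp [gropingBucket, h1, h2, h3]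
          simp [hb, List.append_assoc]

-- dropping empty lists does not change a flatMap whose function kills []
theorem flatMap_filter_nonempty {α β : Type} (ls : List (List α)) (g : List α → List β)
    (hg : g [] = []) :
    (ls.filter (fun l => !l.isEmpty)).flatMap g = ls.flatMap g := by
  induction ls with
  | nil => rfl
  | cons l t ih =>
    cases l <;> simp [ih, hg]

-- A's output loop over all_data is a flatMap of per-list sorts
theorem groping_loop (ls : List (List (Int × Int × Int))) :
    List.foldl
      (fun out_data i =>
        out_data ++ PySem.List.sorted (PySem.List.pyGetD ls i []) (fun point => point.1) false)
      [] (PySem.List.pyRange 0 (ls.length : Int) 1)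
      = ls.flatMap (fun lst => PySem.List.sorted lst (fun point => point.1) false) := by
  rw [PySem.List.foldl_pyRange_zero_pyGetD' ls []
    (fun out_data lst => out_data ++ PySem.List.sorted lst (fun point => point.1) false) []]
  exact PySem.List.foldl_append_eq_flatMap _ _ _

-- A reduces to the same concatenation
theorem groping_eq_buckets (xs : List (Int × Int × Int)) :
    groping xs = gropingSb xs 0 ++ gropingSb xs 1 ++ gropingSb xs 2 ++ gropingSb xs 3 := by
  unfold groping
  rw [gropingStep_foldl xs [] [] [] []]
  simp only [List.nil_append]
  rw [groping_loop]
  rw [flatMap_filter_nonempty _ _ rfl]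
  simp [gropingSb, List.append_assoc]

-- ===== VERDICT (by name: the statement is the Claim_ definition above) =====
theorem groping_spec : Claim_equal_groping := by
  intro coordinats _
  unfold Spec_groping
  rw [groping_eq_buckets, groping_alt_eq_buckets]
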